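-- pv_equiv track=rewrite | github.com/miguel91it/datacompression-scientific-inititation | codigos/jpeg.py | buscaLinhaColunaCoeficiente
-- ===== SOURCE A (Python) =====
-- TABELA_COEFICIENTES = [	['0', [0, 0], [0, 0]],
-- 						['10', [-1, -1], [1, 1]],
-- 						['110', [-3, -2], [2, 3]],
-- 						['1110', [-7, -4], [4, 7]],
-- 						['11110', [-15, -8], [8, 15]],
-- 						['111110', [-31, -16], [16, 31]],
-- 						['1111110', [-63, -32], [32, 63]],
-- 						['11111110', [-127, -64], [64, 127]],
-- 						['111111110', [-255, -128], [128, 255]],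
-- 						['1111111110', [-511, -256], [256, 511]],
-- 						['11111111110', [-1023, -512], [512, 1023]],
-- 						['111111111110', [-2047, -1024], [1024, 2047]],
-- 						['1111111111110', [-4095, -2048], [2048, 4095]],
-- 						['11111111111110', [-8191, -4096], [4096, 8191]],
-- 						['111111111111110', [-16383, -8192], [8192, 16383]],
-- 						['1111111111111110', [-32767, -16384], [16384, 32767]]  ]
--
-- def buscaLinhaColunaCoeficiente(coeficienteAC_DC):
--
-- 	linhaEncontrada = -1
--
-- 	colunaEncontrada = 0
--
-- 	linha = 0
--
-- 	#percorre a tabela de coeficientes e encontra a primeira linha a que o DC pertence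
-- 	while linhaEncontrada == -1:
--
-- 		inicioIntervaloPositivo = TABELA_COEFICIENTES[linha][2][0]
--
-- 		fimIntervaloPositivo    = TABELA_COEFICIENTES[linha][2][1]
--
-- 		#quando o coeficiente for encontrado no primeiro intervalo, grava o codigo da linha
-- 		if (abs(coeficienteAC_DC) >= inicioIntervaloPositivo and abs(coeficienteAC_DC) <= fimIntervaloPositivo):
--
-- 			linhaEncontrada = linha
--
-- 			#para coeficiente negativo, transformo a coluna encontrada do intervalo positivo em coluna do intervalo negativo
-- 			if coeficienteAC_DC < 0:
--
-- 				colunaEncontrada = fimIntervaloPositivo - abs(coeficienteAC_DC)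
--
-- 			#para coeficiente positivo, a coluna possui o mesmo valor do coeficiente
-- 			if coeficienteAC_DC > 0:
--
-- 				colunaEncontrada = coeficienteAC_DC
--
-- 		linha += 1
--
-- 	parLinhaColuna = (linhaEncontrada, colunaEncontrada)
--
-- 	return parLinhaColuna
-- ===== SOURCE B (Python) =====
-- def buscaLinhaColunaCoeficiente(coeficienteAC_DC):
--     magnitude = abs(coeficienteAC_DC)
--     linha = magnitude.bit_length()
--     if coeficienteAC_DC < 0:
--         coluna = (1 << linha) - 1 - magnitude
--     elif coeficienteAC_DC > 0:
--         coluna = coeficienteAC_DC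
--     else:
--         coluna = 0
--     return (linha, coluna)
-- ===== Notes on version B (the rewrite author's own statement) =====
-- stated objective: simpler
-- what changed: Replaced the while-loop scan over the 16-row coefficient table with a closed form: the row is abs(coef).bit_length() and the column comes from the sign logic with 2^linha-1 as the interval end, so no table and no loop remain.
import Mathlib
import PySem

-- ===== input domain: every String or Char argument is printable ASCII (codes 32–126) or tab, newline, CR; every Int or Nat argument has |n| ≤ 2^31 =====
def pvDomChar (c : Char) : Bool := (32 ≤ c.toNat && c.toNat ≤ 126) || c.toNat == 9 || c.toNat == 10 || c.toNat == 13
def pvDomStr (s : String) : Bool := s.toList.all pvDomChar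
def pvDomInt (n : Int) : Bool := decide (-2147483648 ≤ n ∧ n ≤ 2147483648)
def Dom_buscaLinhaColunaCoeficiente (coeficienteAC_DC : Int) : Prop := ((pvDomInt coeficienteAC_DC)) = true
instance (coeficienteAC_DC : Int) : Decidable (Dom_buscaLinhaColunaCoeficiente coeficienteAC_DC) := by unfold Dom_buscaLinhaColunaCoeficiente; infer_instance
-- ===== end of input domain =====

-- B replaces A's while-loop table scan by the closed form linha = bit_length(|coef|); return-value
-- equivalence is proved on Pre_ (|coef| ≤ 32767, exactly where A returns instead of raising IndexError).

-- ===== PORT A =====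
-- rows of TABELA_COEFICIENTES: (codigo, intervalo negativo, intervalo positivo)
def tabelaCoeficientes : List (String × (Int × Int) × (Int × Int)) :=
  [ ("0", (0, 0), (0, 0)),
    ("10", (-1, -1), (1, 1)),
    ("110", (-3, -2), (2, 3)),
    ("1110", (-7, -4), (4, 7)),
    ("11110", (-15, -8), (8, 15)),
    ("111110", (-31, -16), (16, 31)),
    ("1111110", (-63, -32), (32, 63)),
    ("11111110", (-127, -64), (64, 127)),
    ("111111110", (-255, -128), (128, 255)),
    ("1111111110", (-511, -256), (256, 511)),
    ("11111111110", (-1023, -512), (512, 1023)),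
    ("111111111110", (-2047, -1024), (1024, 2047)),
    ("1111111111110", (-4095, -2048), (2048, 4095)),
    ("11111111111110", (-8191, -4096), (4096, 8191)),
    ("111111111111110", (-16383, -8192), (8192, 16383)),
    ("1111111111111110", (-32767, -16384), (16384, 32767)) ]

-- the while-loop: walk the table rows in order with the running index `linha`;
-- exhausting the table corresponds to Python's IndexError (excluded by Pre_), we return (-1, 0) there.
def buscaLoop (c : Int) : List (String × (Int × Int) × (Int × Int)) → Int → Int × Int
  | [], _ => (-1, 0)
  | row :: rest, linha =>
    let inicioIntervaloPositivo := row.2.2.1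
    let fimIntervaloPositivo := row.2.2.2
    if (c.natAbs : Int) ≥ inicioIntervaloPositivo ∧ (c.natAbs : Int) ≤ fimIntervaloPositivo then
      (linha,
        if c < 0 then fimIntervaloPositivo - (c.natAbs : Int)
        else if c > 0 then c else 0)
    else buscaLoop c rest (linha + 1)

def buscaLinhaColunaCoeficiente (coeficienteAC_DC : Int) : Int × Int :=
  buscaLoop coeficienteAC_DC tabelaCoeficientes 0

-- ===== PORT B =====
def buscaLinhaColunaCoeficiente_alt (coeficienteAC_DC : Int) : Int × Int :=
  let magnitude := coeficienteAC_DC.natAbs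
  let linha : Int := (Nat.size magnitude : Int)   -- abs(coef).bit_length()
  let coluna : Int :=
    if coeficienteAC_DC < 0 then (2 ^ Nat.size magnitude : Int) - 1 - (magnitude : Int)
    else if coeficienteAC_DC > 0 then coeficienteAC_DC
    else 0
  (linha, coluna)

-- ===== PRECONDITION & SPEC =====
-- Pre_ excludes |coef| ≥ 32768, where A's loop runs past the 16-row table and raises IndexError.
def Pre_buscaLinhaColunaCoeficiente (coeficienteAC_DC : Int) : Prop :=
  coeficienteAC_DC.natAbs ≤ 32767
instance (coeficienteAC_DC : Int) : Decidable (Pre_buscaLinhaColunaCoeficiente coeficienteAC_DC) := by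
  unfold Pre_buscaLinhaColunaCoeficiente; infer_instance
def pvWitness_buscaLinhaColunaCoeficiente : Int := (-37)

def Spec_buscaLinhaColunaCoeficiente (coeficienteAC_DC : Int) (out : Int × Int) : Prop := out = buscaLinhaColunaCoeficiente_alt coeficienteAC_DC
instance (coeficienteAC_DC : Int) (out : Int × Int) : Decidable (Spec_buscaLinhaColunaCoeficiente coeficienteAC_DC out) := by unfold Spec_buscaLinhaColunaCoeficiente; infer_instance

-- ===== CLAIM (what is proved, stated in full; the proofs are below) =====
def Claim_equal_buscaLinhaColunaCoeficiente : Prop := ∀ (coeficienteAC_DC : Int), Dom_buscaLinhaColunaCoeficiente coeficienteAC_DC → Pre_buscaLinhaColunaCoeficiente coeficienteAC_DC → Spec_buscaLinhaColunaCoeficiente coeficienteAC_DC (buscaLinhaColunaCoeficiente coeficienteAC_DC)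
-- ===== LEMMAS AND PROOFS =====

-- one step of the while-loop: row does not match
theorem loop_miss (c : Int) (s : String) (p : Int × Int) (a b : Int)
    (rest : List (String × (Int × Int) × (Int × Int))) (linha : Int)
    (h : ¬((c.natAbs : Int) ≥ a ∧ (c.natAbs : Int) ≤ b)) :
    buscaLoop c ((s, p, (a, b)) :: rest) linha = buscaLoop c rest (linha + 1) := by
  conv_lhs => unfold buscaLoop
  rw [if_neg h]

-- one step of the while-loop: row matches
theorem loop_hit (c : Int) (s : String) (p : Int × Int) (a b : Int)
    (rest : List (String × (Int × Int) × (Int × Int))) (linha : Int)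
    (h : (c.natAbs : Int) ≥ a ∧ (c.natAbs : Int) ≤ b) :
    buscaLoop c ((s, p, (a, b)) :: rest) linha =
      (linha, if c < 0 then b - (c.natAbs : Int) else if c > 0 then c else 0) := by
  conv_lhs => unfold buscaLoop
  rw [if_pos h]

theorem main_eq : ∀ (c : Int), c.natAbs ≤ 32767 →
    buscaLinhaColunaCoeficiente c = buscaLinhaColunaCoeficiente_alt c := by
  intro c h
  have hk : Nat.size c.natAbs ≤ 16 := Nat.size_le.mpr (by omega)
  rcases Nat.lt_or_ge c.natAbs 1 with h0 | h0
  · -- n = 0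
    have hn : c.natAbs = 0 := by omega
    have hc : c = 0 := by omega
    subst hc
    simp [buscaLinhaColunaCoeficiente, buscaLinhaColunaCoeficiente_alt, buscaLoop,
      tabelaCoeficientes, Nat.size]
  · have hsz : 1 ≤ Nat.size c.natAbs := Nat.lt_size.mpr (by simpa using h0)
    -- k := size - 1, with 2^k ≤ n < 2^(k+1)
    obtain ⟨k, hkeq⟩ : ∃ k, Nat.size c.natAbs = k + 1 := ⟨Nat.size c.natAbs - 1, by omega⟩
    have hlow : 2 ^ k ≤ c.natAbs := Nat.lt_size.mp (by omega)
    have hhigh : c.natAbs < 2 ^ (k + 1) := Nat.size_le.mp (by omega)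
    have hk15 : k ≤ 15 := by omega
    interval_cases k <;>
      · unfold buscaLinhaColunaCoeficiente tabelaCoeficientes
        repeat first
          | rw [loop_hit (h := ⟨by omega, by omega⟩)]
          | rw [loop_miss (h := by omega)]
        simp only [buscaLinhaColunaCoeficiente_alt, hkeq]
        split_ifs <;> simp only [Prod.mk.injEq, and_true] <;> omega

-- ===== VERDICT (by name: the statement is the Claim_ definition above) =====
theorem buscaLinhaColunaCoeficiente_spec : Claim_equal_buscaLinhaColunaCoeficiente := by
  intro c _ hpre
  exact main_eq c hpre
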